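-- pv_equiv track=rewrite | github.com/DavidBartram/advent-of-code | 2024/day22-2.py | advance_n_steps
-- ===== SOURCE A (Python) =====
-- def mix(value1, value2):
--     return value1 ^ value2
--
-- def prune(value):
--     return value % 16777216
--
-- def advance(value):
--     x = prune(mix(value * 64, value))
--
--     y = prune(mix(x // 32, x))
--
--     return prune(mix(y * 2048, y))
--
-- def advance_n_steps(value, n):
--     prices = []
--     price_deltas = []
--     for _ in range(n):
--         prices.append(int(str(value)[-1]))
--         value = advance(value)
--         if len(prices) > 1:
--             price_deltas.append(prices[-1] - prices[-2])
--
--     return value, prices, price_deltas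
-- ===== SOURCE B (Python) =====
-- def mix(value1, value2):
--     return value1 ^ value2
--
-- def prune(value):
--     return value % 16777216
--
-- def advance(value):
--     x = prune(mix(value * 64, value))
--     y = prune(mix(x // 32, x))
--     return prune(mix(y * 2048, y))
--
-- def advance_n_steps(value, n):
--     # divide and conquer: run the first half, then the second half from the
--     # midpoint state, and stitch prices/deltas at the seam
--     if n <= 0:
--         return value, [], []
--     if n == 1:
--         return advance(value), [int(str(value)[-1])], []
--     half = n // 2
--     mid, p1, d1 = advance_n_steps(value, half)
--     end, p2, d2 = advance_n_steps(mid, n - half)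
--     return end, p1 + p2, d1 + [p2[0] - p1[-1]] + d2
-- ===== Notes on version B (the rewrite author's own statement) =====
-- stated objective: alternative
-- what changed: A is a single sequential loop maintaining prices and deltas with negative-index lookups; B is a divide-and-conquer recursion that solves the two halves of the step count independently from their start states and merges the results, adding one seam delta p2[0]-p1[-1].
import Mathlib
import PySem

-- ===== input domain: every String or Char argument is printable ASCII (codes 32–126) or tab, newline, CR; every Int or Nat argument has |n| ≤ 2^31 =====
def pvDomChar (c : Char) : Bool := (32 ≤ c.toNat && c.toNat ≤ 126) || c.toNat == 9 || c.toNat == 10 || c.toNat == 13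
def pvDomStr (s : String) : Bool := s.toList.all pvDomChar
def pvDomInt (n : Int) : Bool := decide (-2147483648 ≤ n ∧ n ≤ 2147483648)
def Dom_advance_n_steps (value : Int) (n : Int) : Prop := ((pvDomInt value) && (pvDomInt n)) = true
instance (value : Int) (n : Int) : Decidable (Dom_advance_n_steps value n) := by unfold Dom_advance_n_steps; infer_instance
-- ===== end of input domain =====

-- B replaces A's single sequential loop by a divide-and-conquer recursion: the two halves
-- of the step count are solved independently from their start states and the results are
-- merged with one seam delta (objective: alternative; not faster).

-- ===== PORT A =====
-- shared module helpers mix / prune / advance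
def pvMix (value1 value2 : Int) : Int := PySem.Int.bxor value1 value2

def pvPrune (value : Int) : Int := PySem.Int.mod value 16777216

def pvAdvance (value : Int) : Int :=
  let x := pvPrune (pvMix (value * 64) value)
  let y := pvPrune (pvMix (PySem.Int.floordiv x 32) x)
  pvPrune (pvMix (y * 2048) y)

-- int(str(value)[-1]); str(int) is never empty and its last char is a digit, so the
-- .getD 0 defaults are unreachable
def pvDigit (value : Int) : Int :=
  match PySem.List.pyGet? (PySem.Int.toChars value) (-1) with
  | some c => (PySem.Int.ofChars? [c]).getD 0
  | none => 0

-- the body of A's for-loop, acting on the state (value, prices, price_deltas)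
def pvStepA (st : Int × List Int × List Int) : Int × List Int × List Int :=
  let prices := st.2.1 ++ [pvDigit st.1]
  let value := pvAdvance st.1
  let deltas :=
    if prices.length > 1 then
      st.2.2 ++ [((PySem.List.pyGet? prices (-1)).getD 0) - ((PySem.List.pyGet? prices (-2)).getD 0)]
    else st.2.2
  (value, prices, deltas)

def advance_n_steps (value : Int) (n : Int) : Int × List Int × List Int :=
  (PySem.List.pyRange 0 n 1).foldl (fun st _ => pvStepA st) (value, [], [])

-- ===== PORT B =====
-- divide and conquer; p2[0] / p1[-1] via pyGet?: both halves are non-empty when n ≥ 2,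
-- so the .getD 0 defaults are unreachable
def advance_n_steps_alt (value : Int) (n : Int) : Int × List Int × List Int :=
  if _h0 : n ≤ 0 then (value, [], [])
  else if _h1 : n = 1 then (pvAdvance value, [pvDigit value], [])
  else
    let half := PySem.Int.floordiv n 2
    let r1 := advance_n_steps_alt value half
    let r2 := advance_n_steps_alt r1.1 (n - half)
    (r2.1, r1.2.1 ++ r2.2.1,
      r1.2.2 ++ ((PySem.List.pyGet? r2.2.1 0).getD 0 - (PySem.List.pyGet? r1.2.1 (-1)).getD 0) :: r2.2.2)
termination_by n.toNat
decreasing_by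
  · rw [PySem.Int.floordiv_eq_ediv_of_pos (by norm_num)]; omega
  · rw [PySem.Int.floordiv_eq_ediv_of_pos (by norm_num)]; omega

-- ===== PRECONDITION & SPEC =====
def Spec_advance_n_steps (value : Int) (n : Int) (out : Int × List Int × List Int) : Prop := out = advance_n_steps_alt value n
instance (value : Int) (n : Int) (out : Int × List Int × List Int) : Decidable (Spec_advance_n_steps value n out) := by unfold Spec_advance_n_steps; infer_instance

-- ===== CLAIM =====
def Claim_equal_advance_n_steps : Prop := ∀ (value : Int) (n : Int), Dom_advance_n_steps value n → Spec_advance_n_steps value n (advance_n_steps value n)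

-- ===== LEMMAS AND PROOFS =====

-- prices after k iterations of A's loop, started at value v
def pvP (v : Int) (k : Nat) : List Int := (List.range k).map (fun i => pvDigit (pvAdvance^[i] v))

-- consecutive differences
def pvDZ (p : List Int) : List Int := (p.zip (p.drop 1)).map (fun pq => pq.2 - pq.1)

lemma pyGet_last {α : Type} (l : List α) (a : α) :
    PySem.List.pyGet? (l ++ [a]) (-1) = some a := by
  simp [PySem.List.pyGet?, PySem.List.pyIdx?]

lemma pyGet_last2 {α : Type} (l : List α) (x a : α) :
    PySem.List.pyGet? (l ++ [x, a]) (-1) = some a := by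
  rw [show l ++ [x, a] = (l ++ [x]) ++ [a] by simp]
  exact pyGet_last _ _

lemma pyGet_pen {α : Type} (l : List α) (x a : α) :
    PySem.List.pyGet? (l ++ [x, a]) (-2) = some x := by
  simp [PySem.List.pyGet?, PySem.List.pyIdx?]

lemma pvP_succ (v : Int) (k : Nat) :
    pvP v (k + 1) = pvP v k ++ [pvDigit (pvAdvance^[k] v)] := by
  simp [pvP, List.range_succ]

lemma pvDZ_cons_cons (a b : Int) (t : List Int) :
    pvDZ (a :: b :: t) = (b - a) :: pvDZ (b :: t) := rfl

lemma pvDZ_append (p : List Int) (x a : Int) :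
    pvDZ (p ++ [x, a]) = pvDZ (p ++ [x]) ++ [a - x] := by
  induction p with
  | nil => simp [pvDZ]
  | cons y p ih =>
    cases p with
    | nil => simp [pvDZ]
    | cons z p' =>
      have h1 : (y :: z :: p') ++ [x, a] = y :: z :: (p' ++ [x, a]) := by simp
      have h2 : (y :: z :: p') ++ [x] = y :: z :: (p' ++ [x]) := by simp
      rw [h1, h2, pvDZ_cons_cons, pvDZ_cons_cons]
      simp only [List.cons_append] at ih ⊢
      rw [ih]

lemma iterate_pvStepA (v : Int) : ∀ k : Nat,
    pvStepA^[k] (v, [], []) = (pvAdvance^[k] v, pvP v k, pvDZ (pvP v k)) := by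
  intro k
  induction k with
  | zero => simp [pvP, pvDZ]
  | succ k ih =>
    rw [Function.iterate_succ_apply', ih]
    unfold pvStepA
    simp only []
    rw [← pvP_succ]
    cases k with
    | zero =>
      simp [pvP, pvDZ]
    | succ j =>
      have hlen : (pvP v (j + 1 + 1)).length > 1 := by simp [pvP]
      have hsplit : pvP v (j + 1 + 1) = pvP v j ++ [pvDigit (pvAdvance^[j] v), pvDigit (pvAdvance^[j+1] v)] := by
        rw [pvP_succ, pvP_succ]; simp
      refine Prod.ext ?_ (Prod.ext rfl ?_)
      · simp [Function.iterate_succ_apply']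
      · simp only [if_pos hlen]
        rw [hsplit, pyGet_last2, pyGet_pen, pvDZ_append, Option.getD_some, Option.getD_some, ← pvP_succ]

lemma foldl_stepA (l : List Int) (v : Int) :
    l.foldl (fun st _ => pvStepA st) (v, [], []) = pvStepA^[l.length] (v, [], []) :=
  List.foldl_const pvStepA (v, [], []) l

lemma pyRange_len (n : Int) : (PySem.List.pyRange 0 n 1).length = n.toNat := by
  simp [PySem.List.pyRange]; omega

-- prices of a concatenated run split at the midpoint state
lemma pvP_add (v : Int) (k1 k2 : Nat) :
    pvP v (k1 + k2) = pvP v k1 ++ pvP (pvAdvance^[k1] v) k2 := by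
  unfold pvP
  rw [List.range_add, List.map_append, List.map_map]
  congr 1
  refine List.map_congr_left ?_
  intro i _
  simp only [Function.comp]
  rw [Nat.add_comm k1 i, Function.iterate_add_apply]

-- deltas of a concatenation: the two halves' deltas plus one seam delta
lemma pvDZ_join (p : List Int) (b l : Int) (t : List Int) (hp : p.getLast? = some l) :
    pvDZ (p ++ b :: t) = pvDZ p ++ (b - l) :: pvDZ (b :: t) := by
  induction p with
  | nil => simp at hp
  | cons a p ih =>
    cases p with
    | nil =>
      simp at hp
      subst hp
      simp [pvDZ]
    | cons c p' =>
      have hp' : (c :: p').getLast? = some l := by simpa using hp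
      have h1 : (a :: c :: p') ++ b :: t = a :: c :: (p' ++ b :: t) := by simp
      rw [h1, pvDZ_cons_cons]
      rw [show c :: (p' ++ b :: t) = (c :: p') ++ b :: t by simp]
      rw [ih hp', pvDZ_cons_cons]
      simp

lemma B_eq (k : Nat) : ∀ (v n : Int), n.toNat = k →
    advance_n_steps_alt v n = (pvAdvance^[k] v, pvP v k, pvDZ (pvP v k)) := by
  induction k using Nat.strong_induction_on with
  | _ k ih =>
    intro v n hk
    unfold advance_n_steps_alt
    by_cases h0 : n ≤ 0
    · have : k = 0 := by omega
      subst this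
      simp [h0, pvP, pvDZ]
    · by_cases h1 : n = 1
      · have : k = 1 := by subst h1; simp at hk; omega
        subst this
        simp [h1, pvP, pvDZ]
      · simp only [dif_neg h0, dif_neg h1]
        have h2 : 2 ≤ n := by omega
        have hhe : PySem.Int.floordiv n 2 = n / 2 :=
          PySem.Int.floordiv_eq_ediv_of_pos (by norm_num)
        set half := PySem.Int.floordiv n 2 with hhalf
        have hk1lt : half.toNat < k := by rw [hhe] at hhalf ⊢; omega
        have hk2lt : (n - half).toNat < k := by rw [hhe] at hhalf ⊢; omega
        have hk1p : 1 ≤ half.toNat := by rw [hhe] at hhalf ⊢; omega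
        have hk2p : 1 ≤ (n - half).toNat := by rw [hhe] at hhalf ⊢; omega
        have hsum : half.toNat + (n - half).toNat = k := by rw [hhe] at hhalf ⊢; omega
        rw [ih half.toNat hk1lt v half rfl]
        rw [ih (n - half).toNat hk2lt _ (n - half) rfl]
        set k1 := half.toNat
        set k2 := (n - half).toNat
        set w := pvAdvance^[k1] v with hw
        obtain ⟨j1, hj1⟩ : ∃ j1, k1 = j1 + 1 := ⟨k1 - 1, by omega⟩
        obtain ⟨j2, hj2⟩ : ∃ j2, k2 = j2 + 1 := ⟨k2 - 1, by omega⟩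
        have hp1 : pvP v k1 = pvP v j1 ++ [pvDigit (pvAdvance^[j1] v)] := by
          rw [hj1, pvP_succ]
        have hp2 : pvP w k2 = pvDigit w :: (List.range j2).map (fun i => pvDigit (pvAdvance^[i+1] w)) := by
          rw [hj2]
          unfold pvP
          rw [List.range_succ_eq_map, List.map_cons, List.map_map]
          rfl
        have hget2 : PySem.List.pyGet? (pvP w k2) 0 = some (pvDigit w) := by
          rw [hp2]; simp [PySem.List.pyGet?, PySem.List.pyIdx?]
        have hget1 : PySem.List.pyGet? (pvP v k1) (-1) = some (pvDigit (pvAdvance^[j1] v)) := by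
          rw [hp1]; exact pyGet_last _ _
        have hlast : (pvP v k1).getLast? = some (pvDigit (pvAdvance^[j1] v)) := by
          rw [hp1]; simp
        refine Prod.ext ?_ (Prod.ext ?_ ?_)
        · show pvAdvance^[k2] w = pvAdvance^[k] v
          rw [hw, ← Function.iterate_add_apply, Nat.add_comm k2 k1, hsum]
        · show pvP v k1 ++ pvP w k2 = pvP v k
          rw [← hsum, pvP_add, hw]
        · show pvDZ (pvP v k1) ++ ((PySem.List.pyGet? (pvP w k2) 0).getD 0 - (PySem.List.pyGet? (pvP v k1) (-1)).getD 0) :: pvDZ (pvP w k2) = pvDZ (pvP v k)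
          rw [hget1, hget2, Option.getD_some, Option.getD_some]
          rw [← hsum, pvP_add, ← hw, hp2]
          rw [pvDZ_join (pvP v k1) _ _ _ hlast, ← hp2]

-- ===== VERDICT =====
theorem advance_n_steps_spec : Claim_equal_advance_n_steps := by
  intro value n _
  unfold Spec_advance_n_steps advance_n_steps
  rw [foldl_stepA, pyRange_len, iterate_pvStepA, B_eq n.toNat value n rfl]
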